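-- pv_equiv track=rewrite | github.com/and227/553913772B61AD1F37A67ED98E10DAAC28141CF5CEA665572927CAFAEFD3A07F | math_charts/celery_proj/logic.py | ckeck_expression
-- ===== SOURCE A (Python) =====
-- supported_tokens = ['t', '(', ')', '+', '-', '*', '/', 'sqrt', 'sin', 'cos', 'tan', 'asin', 'acos', 'atan']
--
-- def ckeck_expression(in_str):
--     current_token = ''
--     token_finded = False
--     str_pointer = 0
--
--     while str_pointer < len(in_str):
--         current_token += in_str[str_pointer]
--         if current_token.isdigit() or current_token in supported_tokens:
--             token_finded = True
--             current_token = ''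
--         str_pointer += 1
--
--     if not token_finded:
--         return False
--
--     return True
-- ===== SOURCE B (Python) =====
-- supported_tokens = ['t', '(', ')', '+', '-', '*', '/', 'sqrt', 'sin', 'cos', 'tan', 'asin', 'acos', 'atan']
--
-- def ckeck_expression(in_str):
--     if not in_str:
--         return False
--     return in_str[0].isdigit() or any(in_str.startswith(t) for t in supported_tokens)
-- ===== Notes on version B (the rewrite author's own statement) =====
-- stated objective: simpler
-- what changed: Replaced the character-accumulation while-loop (which can only match a prefix before the first reset) with a direct closed-form test: non-empty and (first char is a digit or the string starts with a supported token).
import Mathlib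
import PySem

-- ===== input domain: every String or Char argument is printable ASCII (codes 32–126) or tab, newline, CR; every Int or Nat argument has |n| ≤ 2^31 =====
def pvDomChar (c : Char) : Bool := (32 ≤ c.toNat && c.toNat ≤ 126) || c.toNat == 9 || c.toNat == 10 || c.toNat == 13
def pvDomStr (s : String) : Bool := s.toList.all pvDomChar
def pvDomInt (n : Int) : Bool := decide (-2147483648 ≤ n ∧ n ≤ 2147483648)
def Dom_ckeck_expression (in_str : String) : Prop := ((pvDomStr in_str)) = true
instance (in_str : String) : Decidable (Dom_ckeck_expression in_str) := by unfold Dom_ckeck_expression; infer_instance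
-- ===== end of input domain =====

-- B replaces A's character-accumulation scan by a direct closed-form test
-- (first char is a digit, or the string starts with a supported token); objective: simpler.

-- ===== PORT A =====
-- supported_tokens, shared module constant (list of strings, as lists of chars)
def pvSupportedTokens : List (List Char) :=
  ["t".toList, "(".toList, ")".toList, "+".toList, "-".toList, "*".toList, "/".toList,
   "sqrt".toList, "sin".toList, "cos".toList, "tan".toList,
   "asin".toList, "acos".toList, "atan".toList]

-- the while loop of A: state = (remaining chars, current_token, token_finded)
def pvCkeckLoop : List Char → List Char → Bool → Bool
  | [], _, flag => flag
  | c :: rs, cur, flag =>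
    -- current_token += in_str[str_pointer]  (cur ++ [c]); match => reset and set flag
    if PySem.Chars.strIsdigit (cur ++ [c]) || pvSupportedTokens.contains (cur ++ [c]) then
      pvCkeckLoop rs [] true
    else
      pvCkeckLoop rs (cur ++ [c]) flag

def ckeck_expression (in_str : String) : Bool :=
  pvCkeckLoop in_str.toList [] false

-- ===== PORT B =====
def ckeck_expression_alt (in_str : String) : Bool :=
  match in_str.toList with
  | [] => false
  | c :: _ =>
    PySem.Chars.isdigit c
      || pvSupportedTokens.any (fun t => PySem.Chars.startswith in_str.toList t)

-- ===== PRECONDITION & SPEC =====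
def Spec_ckeck_expression (in_str : String) (out : Bool) : Prop := out = ckeck_expression_alt in_str
instance (in_str : String) (out : Bool) : Decidable (Spec_ckeck_expression in_str out) := by unfold Spec_ckeck_expression; infer_instance

-- ===== CLAIM (what is proved, stated in full; the proofs are below) =====
def Claim_equal_ckeck_expression : Prop := ∀ (in_str : String), Dom_ckeck_expression in_str → Spec_ckeck_expression in_str (ckeck_expression in_str)

-- ===== LEMMAS AND PROOFS =====

-- the match condition of A's loop, as a predicate on the accumulated token
def pvCond (cur : List Char) : Bool :=
  PySem.Chars.strIsdigit cur || pvSupportedTokens.contains cur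

-- once token_finded is True it stays True
theorem pvCkeckLoop_flag_true : ∀ (l cur : List Char), pvCkeckLoop l cur true = true := by
  intro l
  induction l with
  | nil => intro cur; rfl
  | cons c rs ih =>
    intro cur
    simp only [pvCkeckLoop]
    split <;> exact ih _

-- if some accumulated token cur ++ l.take k (k ≥ 1) matches, the loop returns true
theorem pvCkeckLoop_hit : ∀ (l cur : List Char) (flag : Bool) (k : Nat),
    1 ≤ k → k ≤ l.length → pvCond (cur ++ l.take k) = true → pvCkeckLoop l cur flag = true := by
  intro l
  induction l with
  | nil => intro cur flag k hk hle _; simp at hle; omega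
  | cons c rs ih =>
    intro cur flag k hk hle hcond
    simp only [pvCkeckLoop]
    by_cases h : pvCond (cur ++ [c]) = true
    · simp only [pvCond] at h
      rw [if_pos h]
      exact pvCkeckLoop_flag_true _ _
    · have hk1 : k ≠ 1 := by
        intro h1; subst h1; simp [List.take] at hcond; exact h hcond
      simp only [pvCond] at h
      rw [if_neg (by simpa using h)]
      have hk2 : 1 ≤ k - 1 := by omega
      apply ih (cur ++ [c]) flag (k - 1) hk2 (by simp at hle; omega)
      have : cur ++ (c :: rs).take k = (cur ++ [c]) ++ rs.take (k - 1) := by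
        obtain ⟨k', rfl⟩ : ∃ k', k = k' + 1 := ⟨k - 1, by omega⟩
        simp [List.take_succ_cons]
      rwa [this] at hcond

-- if no accumulated token ever matches, the loop returns false
theorem pvCkeckLoop_miss : ∀ (l cur : List Char),
    (∀ k : Nat, 1 ≤ k → k ≤ l.length → pvCond (cur ++ l.take k) = false) →
    pvCkeckLoop l cur false = false := by
  intro l
  induction l with
  | nil => intro cur _; rfl
  | cons c rs ih =>
    intro cur h
    simp only [pvCkeckLoop]
    have h1 : pvCond (cur ++ [c]) = false := by
      have := h 1 (by omega) (by simp)
      simpa [List.take] using this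
    simp only [pvCond] at h1
    rw [if_neg (by simp at h1; simpa using h1)]
    apply ih
    intro k hk hle
    have := h (k + 1) (by omega) (by simp; omega)
    simpa [List.take_succ_cons, List.append_assoc] using this

-- no supported token is empty
theorem pvTokens_ne_nil : ∀ t ∈ pvSupportedTokens, t ≠ [] := by decide

-- ===== VERDICT (by name: the statement is the Claim_ definition above) =====
theorem ckeck_expression_spec : Claim_equal_ckeck_expression := by
  intro in_str _
  unfold Spec_ckeck_expression ckeck_expression ckeck_expression_alt
  cases hl : in_str.toList with
  | nil => rfl
  | cons c rs =>
    by_cases hd : PySem.Chars.isdigit c = true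
    · rw [pvCkeckLoop_hit (c :: rs) [] false 1 (by omega) (by simp)
        (by simp [pvCond, List.take, PySem.Chars.strIsdigit, hd])]
      simp [hd]
    · by_cases hs : (∃ t ∈ pvSupportedTokens, PySem.Chars.startswith (c :: rs) t = true)
      · obtain ⟨t, ht, hp⟩ := hs
        have hpre : t <+: (c :: rs) := (PySem.Chars.startswith_iff _ _).mp hp
        have hlen : t.length ≤ (c :: rs).length := hpre.length_le
        have htake : (c :: rs).take t.length = t := (List.prefix_iff_eq_take.mp hpre).symm
        have hne : t ≠ [] := pvTokens_ne_nil t ht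
        have hk1 : 1 ≤ t.length := by
          cases t with
          | nil => exact absurd rfl hne
          | cons _ _ => simp
        rw [pvCkeckLoop_hit (c :: rs) [] false t.length hk1 hlen
          (by simp only [List.nil_append, pvCond, htake]; rw [Bool.or_eq_true]; right
              simp only [List.contains_eq_mem, decide_eq_true_iff]; exact ht)]
        have hany : pvSupportedTokens.any (fun t => PySem.Chars.startswith (c :: rs) t) = true := by
          rw [List.any_eq_true]; exact ⟨t, ht, hp⟩
        simp [hany]
      · push_neg at hs
        rw [pvCkeckLoop_miss (c :: rs) []]
        · have hany : pvSupportedTokens.any (fun t => PySem.Chars.startswith (c :: rs) t) = false := by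
            rw [List.any_eq_false]
            intro t ht
            simpa using hs t ht
          simp [hd, hany]
        · intro k hk _
          have hhead : ((c :: rs).take k) = c :: rs.take (k - 1) := by
            obtain ⟨k', rfl⟩ : ∃ k', k = k' + 1 := ⟨k - 1, by omega⟩
            simp [List.take_succ_cons]
          have hmem : (c :: rs.take (k - 1)) ∉ pvSupportedTokens := by
            intro hm
            have hpre : (c :: rs.take (k - 1)) <+: (c :: rs) := by
              rw [← hhead]; exact List.take_prefix _ _
            exact hs _ hm ((PySem.Chars.startswith_iff _ _).mpr hpre)
          simp only [List.nil_append, pvCond, hhead]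
          rw [Bool.or_eq_false_iff]
          constructor
          · simp [PySem.Chars.strIsdigit, hd]
          · simpa using hmem
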